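-- pv_equiv track=rewrite | github.com/eliottcassidy2000/math | 04-computation/fibonacci_pascal_3strand.py | trinomial_row
-- ===== SOURCE A (Python) =====
-- def trinomial_row(n):
--     """Compute row n of the trinomial triangle (1+x+x^2)^n."""
--     # Start with [1] and convolve with [1,1,1] n times
--     row = [1]
--     for _ in range(n):
--         new_row = [0] * (len(row) + 2)
--         for i, val in enumerate(row):
--             new_row[i] += val
--             new_row[i + 1] += val
--             new_row[i + 2] += val
--         row = new_row
--     return row
-- ===== SOURCE B (Python) =====
-- def trinomial_row(n):
--     """Compute row n of the trinomial triangle (1+x+x^2)^n."""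
--     # O(n) in-row recurrence from (1+x+x^2) f' = n (1+2x) f:
--     #   k*a[k] = (n-k+1)*a[k-1] + (2n-k+2)*a[k-2]   (exact division)
--     if n <= 0:
--         return [1]
--     row = [1, n]
--     for k in range(2, 2 * n + 1):
--         row.append(((n - k + 1) * row[k - 1] + (2 * n - k + 2) * row[k - 2]) // k)
--     return row
-- ===== Notes on version B (the rewrite author's own statement) =====
-- stated objective: faster
-- what changed: A builds the row by convolving with [1,1,1] n times (O(n^2) additions); B fills the single row n directly via the three-term recurrence k*a[k] = (n-k+1)*a[k-1] + (2n-k+2)*a[k-2] derived from (1+x+x^2)f' = n(1+2x)f, using exact integer division (O(n) operations).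
import Mathlib
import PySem

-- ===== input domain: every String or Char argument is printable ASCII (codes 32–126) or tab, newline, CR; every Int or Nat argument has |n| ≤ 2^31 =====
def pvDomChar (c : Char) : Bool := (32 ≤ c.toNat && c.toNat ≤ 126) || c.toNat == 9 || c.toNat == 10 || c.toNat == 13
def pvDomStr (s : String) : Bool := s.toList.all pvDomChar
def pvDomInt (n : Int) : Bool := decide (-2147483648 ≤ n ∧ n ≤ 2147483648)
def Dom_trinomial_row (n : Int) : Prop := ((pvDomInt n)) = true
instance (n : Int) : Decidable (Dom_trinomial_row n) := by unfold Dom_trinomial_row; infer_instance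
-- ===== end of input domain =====

-- B replaces A's n repeated convolutions with [1,1,1] (O(n^2) operations) by the O(n)
-- in-row three-term recurrence k*a[k] = (n-k+1)*a[k-1] + (2n-k+2)*a[k-2] with exact division.

-- ===== PORT A =====
-- new_row[i] += val  (index always in range in A, so getD/set are exact here)
def trinoUpd (l : List Int) (i : Nat) (v : Int) : List Int := l.set i (l.getD i 0 + v)

-- the inner 'for i, val in enumerate(row)' loop, carrying the running index
def trinoScatter : List Int → Nat → List Int → List Int
  | acc, _, [] => acc
  | acc, i, v :: r => trinoScatter (trinoUpd (trinoUpd (trinoUpd acc i v) (i + 1) v) (i + 2) v) (i + 1) r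

-- one iteration of A's outer loop: new_row = [0]*(len(row)+2); scatter; row = new_row
def trinoStep (row : List Int) : List Int := trinoScatter (List.replicate (row.length + 2) 0) 0 row

-- 'for _ in range(n)' (empty for n ≤ 0)
def trinoLoopA : Nat → List Int → List Int
  | 0, row => row
  | m + 1, row => trinoLoopA m (trinoStep row)

def trinomial_row (n : Int) : List Int := trinoLoopA n.toNat [1]

-- ===== PORT B =====
-- row[k-1], row[k-2] are always in range in B, so pyGetD is exact here
def trinomial_row_alt (n : Int) : List Int :=
  if n ≤ 0 then [1]
  else
    (PySem.List.pyRange 2 (2 * n + 1) 1).foldl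
      (fun row k =>
        row ++ [PySem.Int.floordiv
          ((n - k + 1) * PySem.List.pyGetD row (k - 1) 0
            + (2 * n - k + 2) * PySem.List.pyGetD row (k - 2) 0) k])
      [1, n]

-- ===== PRECONDITION & SPEC =====
def Spec_trinomial_row (n : Int) (out : List Int) : Prop := out = trinomial_row_alt n
instance (n : Int) (out : List Int) : Decidable (Spec_trinomial_row n out) := by unfold Spec_trinomial_row; infer_instance

-- ===== CLAIM (what is proved, stated in full; the proofs are below) =====
def Claim_equal_trinomial_row : Prop := ∀ (n : Int), Dom_trinomial_row n → Spec_trinomial_row n (trinomial_row n)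

-- ===== LEMMAS AND PROOFS =====

-- the trinomial triangle: T n k = coefficient of x^k in (1+x+x^2)^n, total over Int k
def trinoT : Nat → Int → Int
  | 0, k => if k = 0 then 1 else 0
  | n + 1, k => trinoT n k + trinoT n (k - 1) + trinoT n (k - 2)

theorem trinoT_zero (n : Nat) (k : Int) (h : k < 0 ∨ 2 * (n : Int) < k) : trinoT n k = 0 := by
  induction n generalizing k with
  | zero => simp only [trinoT]; split <;> omega
  | succ n ih =>
    simp only [trinoT]
    rw [ih k (by push_cast at h ⊢; omega), ih (k-1) (by push_cast at h ⊢; omega),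
        ih (k-2) (by push_cast at h ⊢; omega)]
    ring

theorem trinoT_zero' (n : Nat) : trinoT n 0 = 1 := by
  induction n with
  | zero => simp [trinoT]
  | succ n ih => simp only [trinoT]; rw [ih, trinoT_zero n (0-1) (by omega), trinoT_zero n (0-2) (by omega)]; ring

theorem trinoT_one (n : Nat) : trinoT n 1 = (n : Int) := by
  induction n with
  | zero => simp [trinoT]
  | succ n ih =>
    simp only [trinoT]
    rw [ih, show (1:Int)-1 = 0 from by ring, trinoT_zero' n, trinoT_zero n (1-2) (by omega)]
    push_cast; ring

-- the downward recurrence from (1+x+x^2) f' = n (1+2x) f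
theorem trinoT_rec (n : Nat) (k : Int) :
    k * trinoT n k = ((n : Int) - k + 1) * trinoT n (k - 1) + (2 * (n : Int) - k + 2) * trinoT n (k - 2) := by
  induction n generalizing k with
  | zero =>
    simp only [trinoT]
    split_ifs <;> push_cast <;> first | omega | ring
  | succ n ih =>
    have h1 := ih k
    have h2 := ih (k - 1)
    have h3 := ih (k - 2)
    simp only [trinoT]
    push_cast
    ring_nf
    ring_nf at h1 h2 h3
    linarith [h1, h2, h3]

-- ---- A-side characterization ----

def trinoRget (row : List Int) (i : Int) : Int := if 0 ≤ i then row.getD i.toNat 0 else 0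

theorem trinoRget_nil (i : Int) : trinoRget [] i = 0 := by
  simp [trinoRget, List.getD]

theorem trinoRget_cons (v : Int) (t : List Int) (i : Int) :
    trinoRget (v :: t) i = if i = 0 then v else trinoRget t (i - 1) := by
  unfold trinoRget
  by_cases h0 : i = 0
  · subst h0; simp
  · by_cases hp : 0 ≤ i
    · have hp1 : 0 ≤ i - 1 := by omega
      rw [if_pos hp, if_neg h0, if_pos hp1]
      have : i.toNat = (i - 1).toNat + 1 := by omega
      rw [this]; simp
    · have hp1 : ¬ 0 ≤ i - 1 := by omega
      rw [if_neg hp, if_neg h0, if_neg hp1]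

theorem trinoUpd_length (l : List Int) (i : Nat) (v : Int) : (trinoUpd l i v).length = l.length := by
  simp [trinoUpd]

theorem trinoUpd_getD (l : List Int) (i : Nat) (v : Int) (j : Nat) :
    (trinoUpd l i v).getD j 0 = l.getD j 0 + (if j = i ∧ i < l.length then v else 0) := by
  unfold trinoUpd
  simp only [List.getD, List.getElem?_set]
  by_cases hij : i = j
  · subst hij
    by_cases hl : i < l.length
    · simp [hl]
    · simp [hl]
  · simp [hij, Ne.symm hij]

theorem trinoScatter_length (acc : List Int) (i : Nat) (r : List Int) :
    (trinoScatter acc i r).length = acc.length := by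
  induction r generalizing acc i with
  | nil => rfl
  | cons v t ih => simp [trinoScatter, ih, trinoUpd_length]

theorem trinoScatter_getD (r : List Int) (acc : List Int) (i0 : Nat) (j : Nat)
    (hlen : i0 + r.length + 2 ≤ acc.length) :
    (trinoScatter acc i0 r).getD j 0 =
      acc.getD j 0 + trinoRget r ((j : Int) - i0) + trinoRget r ((j : Int) - i0 - 1)
        + trinoRget r ((j : Int) - i0 - 2) := by
  induction r generalizing acc i0 with
  | nil => simp [trinoScatter, trinoRget_nil]
  | cons v t ih =>
    simp only [trinoScatter]
    rw [ih _ (i0 + 1) (by simp at hlen ⊢; simp [trinoUpd_length]; omega)]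
    simp only [trinoUpd_getD, trinoUpd_length, trinoRget_cons]
    simp only [List.length_cons] at hlen
    have h0 : i0 < acc.length := by omega
    have h1 : i0 + 1 < acc.length := by omega
    have h2 : i0 + 2 < acc.length := by omega
    push_cast
    rw [show (j : Int) - (↑i0 + 1) = ↑j - ↑i0 - 1 from by ring,
        show (j : Int) - ↑i0 - 1 - 2 = ↑j - ↑i0 - 2 - 1 from by ring]
    have hz : ∀ x : Int, ¬ 0 ≤ x → trinoRget t x = 0 := by
      intro x hx; unfold trinoRget; rw [if_neg hx]
    have z1 : 0 ≤ (j : Int) - ↑i0 - 1 ∨ trinoRget t ((j : Int) - ↑i0 - 1) = 0 :=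
      Decidable.or_iff_not_imp_left.mpr (hz _)
    have z2 : 0 ≤ (j : Int) - ↑i0 - 1 - 1 ∨ trinoRget t ((j : Int) - ↑i0 - 1 - 1) = 0 :=
      Decidable.or_iff_not_imp_left.mpr (hz _)
    have z3 : 0 ≤ (j : Int) - ↑i0 - 2 - 1 ∨ trinoRget t ((j : Int) - ↑i0 - 2 - 1) = 0 :=
      Decidable.or_iff_not_imp_left.mpr (hz _)
    split_ifs <;> omega

theorem trinoStep_map (j : Nat) :
    trinoStep ((List.range (2 * j + 1)).map (fun i : Nat => trinoT j (i : Int))) =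
      (List.range (2 * (j + 1) + 1)).map (fun i : Nat => trinoT (j + 1) (i : Int)) := by
  set row := (List.range (2 * j + 1)).map (fun i : Nat => trinoT j (i : Int)) with hrow
  have hrl : row.length = 2 * j + 1 := by simp [hrow]
  have hget : ∀ x : Int, trinoRget row x = trinoT j x := by
    intro x
    unfold trinoRget
    split_ifs with h
    · rcases Decidable.em (x.toNat < 2 * j + 1) with hin | hout
      · rw [hrow]
        rw [List.getD_eq_getElem _ _ (by simpa using hin), List.getElem_map]
        congr 1
        rw [List.getElem_range]
        omega
      · rw [List.getD_eq_default _ _ (by rw [hrl]; omega)]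
        rw [trinoT_zero j x (by right; omega)]
    · rw [trinoT_zero j x (by left; omega)]
  apply List.ext_getElem
  · simp [trinoStep, trinoScatter_length, hrl]
    omega
  · intro i hi1 hi2
    have hlen1 : (trinoStep row).length = 2 * j + 3 := by
      simp [trinoStep, trinoScatter_length, hrl]
    have hi : i < 2 * j + 3 := by rwa [hlen1] at hi1
    have lhs : (trinoStep row).getD i 0 = trinoT j i + trinoT j ((i : Int) - 1) + trinoT j ((i : Int) - 2) := by
      unfold trinoStep
      rw [trinoScatter_getD row _ 0 i (by simp [hrl])]
      simp only [Nat.cast_zero, Int.sub_zero]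
      rw [List.getD_replicate _ (by omega : i < row.length + 2)]
      rw [hget, hget, hget]
      ring
    rw [← List.getD_eq_getElem _ 0 hi1, ← List.getD_eq_getElem _ 0 hi2, lhs,
        List.getD_eq_getElem _ 0 hi2]
    simp [trinoT]

theorem trinoLoopA_inv (m j : Nat) :
    trinoLoopA m ((List.range (2 * j + 1)).map (fun i : Nat => trinoT j (i : Int))) =
      (List.range (2 * (j + m) + 1)).map (fun i : Nat => trinoT (j + m) (i : Int)) := by
  induction m generalizing j with
  | zero => rfl
  | succ m ih =>
    show trinoLoopA m (trinoStep _) = _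
    rw [trinoStep_map j, ih (j + 1)]
    have : j + 1 + m = j + (m + 1) := by omega
    rw [this]

theorem trinomial_row_eq_map (n : Int) :
    trinomial_row n = (List.range (2 * n.toNat + 1)).map (fun i : Nat => trinoT n.toNat (i : Int)) := by
  unfold trinomial_row
  have h0 : [(1 : Int)] = (List.range (2 * 0 + 1)).map (fun i : Nat => trinoT 0 (i : Int)) := by
    simp [trinoT]
  rw [h0, trinoLoopA_inv n.toNat 0]
  simp

-- ---- B-side characterization ----

theorem trinoB_fold (n : Int) (hn : 1 ≤ n) (c : Nat) (hc : (2 : Int) + c ≤ 2 * n + 1) :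
    ((List.range c).map (fun i : Nat => (2 : Int) + (i : Int))).foldl
      (fun row k =>
        row ++ [PySem.Int.floordiv
          ((n - k + 1) * PySem.List.pyGetD row (k - 1) 0
            + (2 * n - k + 2) * PySem.List.pyGetD row (k - 2) 0) k])
      [1, n] = (List.range (c + 2)).map (fun i : Nat => trinoT n.toNat (i : Int)) := by
  induction c with
  | zero =>
    have h1 : trinoT n.toNat 1 = (n.toNat : Int) := trinoT_one n.toNat
    have h2 : ((n.toNat : Int)) = n := Int.toNat_of_nonneg (by omega)
    simp [List.range_succ, trinoT_zero' n.toNat, h1, h2]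
  | succ c ih =>
    rw [List.range_succ, List.map_append, List.foldl_append]
    rw [ih (by push_cast at hc ⊢; omega)]
    simp only [List.map_cons, List.map_nil, List.foldl_cons, List.foldl_nil]
    set row := (List.range (c + 2)).map (fun i : Nat => trinoT n.toNat (i : Int)) with hrow
    have hget : ∀ m : Nat, m < c + 2 → PySem.List.pyGetD row ((m : Int)) 0 = trinoT n.toNat (m : Int) := by
      intro m hm
      rw [PySem.List.pyGetD_natCast]
      rw [hrow, List.getD_eq_getElem _ _ (by simpa using hm)]
      simp
    have e1 : (2 : Int) + (c : Int) - 1 = ((c + 1 : Nat) : Int) := by push_cast; ring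
    have e2 : (2 : Int) + (c : Int) - 2 = ((c : Nat) : Int) := by push_cast; ring
    rw [e1, e2, hget (c + 1) (by omega), hget c (by omega)]
    have hnum : (n - (2 + (c : Int)) + 1) * trinoT n.toNat ((c + 1 : Nat) : Int)
        + (2 * n - (2 + (c : Int)) + 2) * trinoT n.toNat ((c : Nat) : Int)
        = (2 + (c : Int)) * trinoT n.toNat (2 + (c : Int)) := by
      have := trinoT_rec n.toNat (2 + (c : Int))
      rw [Int.toNat_of_nonneg (by omega)] at this
      have a1 : (2 : Int) + (c : Int) - 1 = ((c + 1 : Nat) : Int) := e1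
      have a2 : (2 : Int) + (c : Int) - 2 = ((c : Nat) : Int) := e2
      rw [a1, a2] at this
      linarith [this]
    rw [hnum]
    have hdiv : PySem.Int.floordiv ((2 + (c : Int)) * trinoT n.toNat (2 + (c : Int))) (2 + (c : Int))
        = trinoT n.toNat (2 + (c : Int)) := by
      rw [PySem.Int.floordiv_eq_ediv_of_pos (by omega)]
      exact Int.mul_ediv_cancel_left _ (by omega)
    rw [hdiv]
    rw [List.range_succ, List.map_append]
    rw [hrow]
    simp only [List.map_cons, List.map_nil]
    congr 2
    push_cast; ring

-- ===== VERDICT (by name: the statement is the Claim_ definition above) =====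
theorem trinomial_row_spec : Claim_equal_trinomial_row := by
  intro n _
  unfold Spec_trinomial_row trinomial_row_alt
  split_ifs with h
  · have : n.toNat = 0 := by omega
    unfold trinomial_row
    rw [this]
    rfl
  · have hn : 1 ≤ n := by omega
    rw [trinomial_row_eq_map n]
    rw [PySem.List.pyRange_one 2 (2 * n + 1)]
    have hcnt : (2 * n + 1 - 2).toNat = 2 * n.toNat - 1 := by omega
    rw [hcnt]
    have := trinoB_fold n hn (2 * n.toNat - 1) (by omega)
    rw [this]
    congr 2
    omega
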